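-- pv_equiv track=rewrite | github.com/RemleyGHooker/vulnscan | scanner_poison_vs_suppress_analysis.py | _contingency_2x2
-- ===== SOURCE A (Python) =====
-- def _contingency_2x2(
--     poison_suppressed: list[int],
--     social_suppressed: list[int],
-- ) -> dict[str, int]:
--     """Rows: scanner directive suppressed? Cols: social engineering suppressed? (paired)."""
--     both = se_only = dir_only = neither = 0
--     for d, se in zip(poison_suppressed, social_suppressed):
--         if d and se:
--             both += 1
--         elif se and not d:
--             se_only += 1
--         elif d and not se:
--             dir_only += 1
--         else:
--             neither += 1
--     return {
--         "directive_yes_social_yes": both,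
--         "directive_no_social_yes": se_only,
--         "directive_yes_social_no": dir_only,
--         "directive_no_social_no": neither,
--     }
-- ===== SOURCE B (Python) =====
-- def _contingency_2x2(
--     poison_suppressed: list[int],
--     social_suppressed: list[int],
-- ) -> dict[str, int]:
--     """Rows: scanner directive suppressed? Cols: social engineering suppressed? (paired)."""
--     pairs = list(zip(poison_suppressed, social_suppressed))
--     n = len(pairs)
--     d_yes = sum(1 for d, _ in pairs if d)
--     s_yes = sum(1 for _, se in pairs if se)
--     both = sum(1 for d, se in pairs if d and se)
--     return {
--         "directive_yes_social_yes": both,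
--         "directive_no_social_yes": s_yes - both,
--         "directive_yes_social_no": d_yes - both,
--         "directive_no_social_no": n - d_yes - s_yes + both,
--     }
-- ===== Notes on version B (the rewrite author's own statement) =====
-- stated objective: alternative
-- what changed: Replaces the per-pair four-way if/elif classification into four accumulators by marginal counting plus inclusion-exclusion: count only n, d_yes, s_yes and the joint 'both', then derive the other three cells arithmetically (se_only = s_yes - both, dir_only = d_yes - both, neither = n - d_yes - s_yes + both).
import Mathlib
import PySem

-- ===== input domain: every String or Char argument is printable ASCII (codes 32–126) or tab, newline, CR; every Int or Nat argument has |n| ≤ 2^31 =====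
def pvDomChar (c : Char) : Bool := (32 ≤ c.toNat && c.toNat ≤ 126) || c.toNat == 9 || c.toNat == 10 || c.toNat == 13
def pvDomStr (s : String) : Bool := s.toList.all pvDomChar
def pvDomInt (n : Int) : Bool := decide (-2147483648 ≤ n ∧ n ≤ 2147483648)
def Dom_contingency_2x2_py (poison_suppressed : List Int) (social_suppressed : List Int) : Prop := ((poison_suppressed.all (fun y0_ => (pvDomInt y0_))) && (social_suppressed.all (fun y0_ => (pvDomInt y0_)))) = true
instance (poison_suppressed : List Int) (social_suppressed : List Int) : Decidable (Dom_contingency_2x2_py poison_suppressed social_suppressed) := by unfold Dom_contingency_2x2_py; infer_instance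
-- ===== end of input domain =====

-- B replaces A's per-pair four-way if/elif classification by marginal counts plus inclusion-exclusion (alternative decomposition; same O(n) cost).


-- ===== PORT A =====
def contingency_2x2_py (poison_suppressed : List Int) (social_suppressed : List Int) : List (String × Int) :=
  let st := (List.zip poison_suppressed social_suppressed).foldl
    (fun (acc : Int × Int × Int × Int) p =>
      if p.1 ≠ 0 ∧ p.2 ≠ 0 then (acc.1 + 1, acc.2.1, acc.2.2.1, acc.2.2.2)
      else if p.2 ≠ 0 ∧ ¬ p.1 ≠ 0 then (acc.1, acc.2.1 + 1, acc.2.2.1, acc.2.2.2)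
      else if p.1 ≠ 0 ∧ ¬ p.2 ≠ 0 then (acc.1, acc.2.1, acc.2.2.1 + 1, acc.2.2.2)
      else (acc.1, acc.2.1, acc.2.2.1, acc.2.2.2 + 1))
    (0, 0, 0, 0)
  [("directive_yes_social_yes", st.1),
   ("directive_no_social_yes", st.2.1),
   ("directive_yes_social_no", st.2.2.1),
   ("directive_no_social_no", st.2.2.2)]

-- ===== PORT B =====
def contingency_2x2_py_alt (poison_suppressed : List Int) (social_suppressed : List Int) : List (String × Int) :=
  let pairs := List.zip poison_suppressed social_suppressed
  let n : Int := pairs.length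
  let d_yes : Int := pairs.countP (fun p => decide (p.1 ≠ 0))
  let s_yes : Int := pairs.countP (fun p => decide (p.2 ≠ 0))
  let both : Int := pairs.countP (fun p => decide (p.1 ≠ 0) && decide (p.2 ≠ 0))
  [("directive_yes_social_yes", both),
   ("directive_no_social_yes", s_yes - both),
   ("directive_yes_social_no", d_yes - both),
   ("directive_no_social_no", n - d_yes - s_yes + both)]

-- ===== PRECONDITION & SPEC =====
def Spec_contingency_2x2_py (poison_suppressed : List Int) (social_suppressed : List Int) (out : List (String × Int)) : Prop := out = contingency_2x2_py_alt poison_suppressed social_suppressed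
instance (poison_suppressed : List Int) (social_suppressed : List Int) (out : List (String × Int)) : Decidable (Spec_contingency_2x2_py poison_suppressed social_suppressed out) := by unfold Spec_contingency_2x2_py; infer_instance

-- ===== CLAIM (what is proved, stated in full; the proofs are below) =====
def Claim_equal_contingency_2x2_py : Prop := ∀ (poison_suppressed : List Int) (social_suppressed : List Int), Dom_contingency_2x2_py poison_suppressed social_suppressed → Spec_contingency_2x2_py poison_suppressed social_suppressed (contingency_2x2_py poison_suppressed social_suppressed)

-- ===== LEMMAS AND PROOFS =====

theorem foldA_counts (l : List (Int × Int)) (b s dr n : Int) :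
    l.foldl
      (fun (acc : Int × Int × Int × Int) p =>
        if p.1 ≠ 0 ∧ p.2 ≠ 0 then (acc.1 + 1, acc.2.1, acc.2.2.1, acc.2.2.2)
        else if p.2 ≠ 0 ∧ ¬ p.1 ≠ 0 then (acc.1, acc.2.1 + 1, acc.2.2.1, acc.2.2.2)
        else if p.1 ≠ 0 ∧ ¬ p.2 ≠ 0 then (acc.1, acc.2.1, acc.2.2.1 + 1, acc.2.2.2)
        else (acc.1, acc.2.1, acc.2.2.1, acc.2.2.2 + 1))
      (b, s, dr, n)
    = (b + (l.countP (fun p => decide (p.1 ≠ 0) && decide (p.2 ≠ 0))),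
       s + (l.countP (fun p => !decide (p.1 ≠ 0) && decide (p.2 ≠ 0))),
       dr + (l.countP (fun p => decide (p.1 ≠ 0) && !decide (p.2 ≠ 0))),
       n + (l.countP (fun p => !decide (p.1 ≠ 0) && !decide (p.2 ≠ 0)))) := by
  induction l generalizing b s dr n with
  | nil => simp
  | cons hd tl ih =>
      obtain ⟨x, y⟩ := hd
      by_cases h1 : x ≠ 0 <;> by_cases h2 : y ≠ 0 <;>
        · simp only [List.foldl_cons, List.countP_cons, h1, h2]
          rw [ih]
          simp [h1, h2, Prod.ext_iff]
          omega

theorem countP_split (l : List (Int × Int)) (q d : Int × Int → Bool) :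
    l.countP q = l.countP (fun p => d p && q p) + l.countP (fun p => !d p && q p) := by
  induction l with
  | nil => simp
  | cons hd tl ih =>
      simp only [List.countP_cons, ih]
      cases hq : q hd <;> cases hd2 : d hd <;> simp <;> omega

-- ===== VERDICT (by name: the statement is the Claim_ definition above) =====
theorem contingency_2x2_py_spec : Claim_equal_contingency_2x2_py := by
  intro ps ss _
  unfold Spec_contingency_2x2_py contingency_2x2_py contingency_2x2_py_alt
  simp only [foldA_counts, zero_add]
  have hc : ∀ (f g : Int × Int → Bool), (∀ p, f p = g p) → (ps.zip ss).countP f = (ps.zip ss).countP g := by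
    intro f g h; exact List.countP_congr (fun p _ => by rw [h])
  have hs := countP_split (ps.zip ss) (fun p => decide (p.2 ≠ 0)) (fun p => decide (p.1 ≠ 0))
  have hd := countP_split (ps.zip ss) (fun p => decide (p.1 ≠ 0)) (fun p => decide (p.2 ≠ 0))
  have hn := countP_split (ps.zip ss) (fun p => true) (fun p => decide (p.1 ≠ 0))
  have hn1 := countP_split (ps.zip ss) (fun p => !decide (p.1 ≠ 0)) (fun p => decide (p.2 ≠ 0))
  simp only [List.countP_true, Bool.and_true] at hn
  rw [hc (fun p => decide (p.2 ≠ 0) && !decide (p.1 ≠ 0)) (fun p => !decide (p.1 ≠ 0) && decide (p.2 ≠ 0)) (fun p => Bool.and_comm _ _),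
      hc (fun p => !decide (p.2 ≠ 0) && !decide (p.1 ≠ 0)) (fun p => !decide (p.1 ≠ 0) && !decide (p.2 ≠ 0)) (fun p => Bool.and_comm _ _)] at hn1
  rw [hc (fun p => decide (p.2 ≠ 0) && decide (p.1 ≠ 0)) (fun p => decide (p.1 ≠ 0) && decide (p.2 ≠ 0)) (fun p => Bool.and_comm _ _),
      hc (fun p => !decide (p.2 ≠ 0) && decide (p.1 ≠ 0)) (fun p => decide (p.1 ≠ 0) && !decide (p.2 ≠ 0)) (fun p => Bool.and_comm _ _)] at hd
  simp only [List.cons.injEq, Prod.mk.injEq, and_true, true_and]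
  and_intros <;> first | rfl | (push_cast; omega)
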